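-- pv_equiv track=rewrite | github.com/josteint/sidfinity | demo/hubbard/build_commando_hg19.py | build_hex_lines
-- ===== SOURCE A (Python) =====
-- def build_hex_lines(data):
--     rows = []
--     row = []
--     for b in data:
--         row.append(f'${b:02X}')
--         if len(row) == 16:
--             rows.append('        .byte ' + ','.join(row))
--             row = []
--     if row:
--         rows.append('        .byte ' + ','.join(row))
--     return '\n'.join(rows)
-- ===== SOURCE B (Python) =====
-- def build_hex_lines(data):
--     data = list(data)
--     rows = []
--     i = 0
--     n = len(data)
--     while i < n:
--         rows.append('        .byte ' + ','.join(f'${b:02X}' for b in data[i:i+16]))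
--         i += 16
--     return '\n'.join(rows)
-- ===== Notes on version B (the rewrite author's own statement) =====
-- stated objective: alternative
-- what changed: B chunks by index: a while loop steps an index 16 at a time and formats each slice data[i:i+16] directly into its line, replacing A's per-element pass with a running row buffer, flush-on-16 counter and trailing flush.
import Mathlib
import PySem

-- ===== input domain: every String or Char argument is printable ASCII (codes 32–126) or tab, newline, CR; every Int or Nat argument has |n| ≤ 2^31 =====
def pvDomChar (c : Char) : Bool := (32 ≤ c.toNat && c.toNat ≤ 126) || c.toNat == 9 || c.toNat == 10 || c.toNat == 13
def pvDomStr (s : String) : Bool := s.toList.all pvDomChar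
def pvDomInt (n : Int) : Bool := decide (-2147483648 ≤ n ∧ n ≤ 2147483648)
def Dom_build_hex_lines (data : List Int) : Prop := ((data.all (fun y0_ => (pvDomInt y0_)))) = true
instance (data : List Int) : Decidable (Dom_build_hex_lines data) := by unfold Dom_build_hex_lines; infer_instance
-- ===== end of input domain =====

-- B chunks by index, formatting data[i:i+16] per line while i steps by 16; A is a per-element
-- pass with a row buffer flushed on a counter. Same return value; objective: alternative.

-- ===== PORT A =====
-- shared helper: Python's f'${b:02X}' (sign, then zero-pad to total width 2, uppercase hex)
def pvHexDigit (n : Nat) : Char :=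
  if n < 10 then Char.ofNat (48 + n) else Char.ofNat (55 + n)

def pvHexChars : Nat → List Char
  | 0 => []
  | (n + 1) => pvHexChars ((n + 1) / 16) ++ [pvHexDigit ((n + 1) % 16)]
decreasing_by exact Nat.div_lt_self (Nat.succ_pos n) (by omega)

def pvFmt (b : Int) : String :=
  let mag : List Char := if b = 0 then ['0'] else pvHexChars b.natAbs
  let sign : List Char := if b < 0 then ['-'] else []
  String.ofList ('$' :: (sign ++ List.replicate (2 - (mag.length + sign.length)) '0' ++ mag))

def build_hex_lines (data : List Int) : String :=
  -- for b in data: row.append(fmt b); if len(row)==16: flush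
  let st := data.foldl
    (fun (st : List String × List String) b =>
      let row := st.2 ++ [pvFmt b]
      if row.length = 16 then (st.1 ++ ["        .byte " ++ PySem.Str.join "," row], ([] : List String))
      else (st.1, row))
    (([] : List String), ([] : List String))
  -- if row: rows.append(...)
  let rows := if st.2 ≠ [] then st.1 ++ ["        .byte " ++ PySem.Str.join "," st.2] else st.1
  PySem.Str.join "\n" rows

-- ===== PORT B =====
-- while i < n: rows.append(line from data[i:i+16]); i += 16; then '\n'.join(rows)
def pvAltLoop (data : List Int) (i : Nat) (rows : List String) : List String :=
  if _h : i < data.length then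
    pvAltLoop data (i + 16)
      (rows ++ ["        .byte " ++
        PySem.Str.join "," ((PySem.List.slice data (some (i : Int)) (some ((i : Int) + 16))).map pvFmt)])
  else rows
termination_by data.length - i

def build_hex_lines_alt (data : List Int) : String :=
  PySem.Str.join "\n" (pvAltLoop data 0 [])

-- ===== PRECONDITION & SPEC =====
def Spec_build_hex_lines (data : List Int) (out : String) : Prop :=
  out = build_hex_lines_alt data

instance (data : List Int) (out : String) : Decidable (Spec_build_hex_lines data out) := by
  unfold Spec_build_hex_lines; infer_instance

-- ===== CLAIM =====
def Claim_equal_build_hex_lines : Prop :=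
  ∀ (data : List Int), Dom_build_hex_lines data →
    Spec_build_hex_lines data (build_hex_lines data)

-- ===== LEMMAS AND PROOFS =====

-- proof-side normal form shared by both directions: the 16-chunking of the formatted strings
def pvLine (row : List String) : String :=
  "        .byte " ++ PySem.Str.join "," row

def pvChunkRows (hexes : List String) : List String :=
  if _h : hexes = [] then []
  else pvLine (hexes.take 16) :: pvChunkRows (hexes.drop 16)
termination_by hexes.length
decreasing_by
  simp only [List.length_drop]
  cases hexes with
  | nil => exact absurd rfl _h
  | cons a t => simp

theorem pvChunkRows_nil : pvChunkRows [] = [] := by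
  rw [pvChunkRows.eq_def]; simp

theorem pvChunkRows_cons (hexes : List String) (h : hexes ≠ []) :
    pvChunkRows hexes = pvLine (hexes.take 16) :: pvChunkRows (hexes.drop 16) := by
  rw [pvChunkRows.eq_def]; simp [h]

-- A's loop invariant: the fold from (rows, acc) with a partial row acc (|acc| < 16),
-- followed by the trailing flush, produces rows ++ 16-chunking of (acc ++ rest)
theorem pvFold_eq_chunk (l : List Int) :
    ∀ (rows acc : List String), acc.length < 16 →
    (let st := l.foldl
        (fun (st : List String × List String) b =>
          let row := st.2 ++ [pvFmt b]
          if row.length = 16 then (st.1 ++ [pvLine row], ([] : List String))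
          else (st.1, row))
        (rows, acc)
     if st.2 ≠ [] then st.1 ++ [pvLine st.2] else st.1)
      = rows ++ pvChunkRows (acc ++ l.map pvFmt) := by
  induction l with
  | nil =>
    intro rows acc hlt
    simp only [List.foldl_nil, List.map_nil, List.append_nil]
    by_cases hacc : acc = []
    · subst hacc; simp [pvChunkRows_nil]
    · rw [pvChunkRows_cons acc hacc,
        List.take_of_length_le (by omega), List.drop_of_length_le (by omega),
        pvChunkRows_nil]
      simp [hacc]
  | cons x xs ih =>
    intro rows acc hlt
    simp only [List.foldl_cons, List.map_cons]
    by_cases h16 : (acc ++ [pvFmt x]).length = 16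
    · simp only [h16, if_pos]
      rw [ih (rows ++ [pvLine (acc ++ [pvFmt x])]) [] (by simp)]
      have hsplit : acc ++ pvFmt x :: xs.map pvFmt
          = (acc ++ [pvFmt x]) ++ xs.map pvFmt := by simp
      rw [List.nil_append, hsplit,
        pvChunkRows_cons ((acc ++ [pvFmt x]) ++ xs.map pvFmt) (by simp),
        ← h16, List.take_left, List.drop_left]
      simp
    · simp only [h16, if_false]
      have hlen : (acc ++ [pvFmt x]).length < 16 := by
        simp only [List.length_append, List.length_cons, List.length_nil] at h16 ⊢
        omega
      rw [ih rows (acc ++ [pvFmt x]) hlen]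
      have : (acc ++ [pvFmt x]) ++ xs.map pvFmt = acc ++ pvFmt x :: xs.map pvFmt := by simp
      rw [this]

-- B's index loop from i appends the 16-chunking of the formatted suffix hexes[i:]
theorem pvAltLoop_eq_chunk (data : List Int) (fuel : Nat) :
    ∀ (i : Nat) (rows : List String), data.length ≤ i + fuel →
    pvAltLoop data i rows = rows ++ pvChunkRows ((data.map pvFmt).drop i) := by
  induction fuel with
  | zero =>
    intro i rows hle
    rw [pvAltLoop]
    have hge : data.length ≤ i := by omega
    rw [dif_neg (by omega), List.drop_of_length_le (by simpa using hge), pvChunkRows_nil,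
      List.append_nil]
  | succ f ih =>
    intro i rows hle
    rw [pvAltLoop]
    by_cases hi : i < data.length
    · rw [dif_pos hi, ih (i + 16) _ (by omega)]
      have hslice : (PySem.List.slice data (some (i : Int)) (some ((i : Int) + 16))).map pvFmt
          = ((data.map pvFmt).drop i).take 16 := by
        have hcast : ((i : Int) + 16) = ((i + 16 : Nat) : Int) := by push_cast; ring
        rw [hcast, PySem.List.slice_natCast data i (i + 16),
          show i + 16 - i = 16 from by omega, List.map_take, List.map_drop]
      rw [pvChunkRows_cons ((data.map pvFmt).drop i) (by
        intro hnil
        have := congrArg List.length hnil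
        simp only [List.length_drop, List.length_map, List.length_nil] at this
        omega)]
      rw [hslice]
      simp [pvLine]
    · rw [dif_neg hi, List.drop_of_length_le (by simp; omega), pvChunkRows_nil,
        List.append_nil]

theorem pvAlt_eq_join (data : List Int) :
    build_hex_lines_alt data = PySem.Str.join "\n" (pvChunkRows (data.map pvFmt)) := by
  unfold build_hex_lines_alt
  rw [pvAltLoop_eq_chunk data data.length 0 [] (by omega)]
  simp

theorem pvA_eq_join (data : List Int) :
    build_hex_lines data = PySem.Str.join "\n" (pvChunkRows (data.map pvFmt)) := by
  have hA := pvFold_eq_chunk data [] [] (by simp)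
  simp only [List.nil_append, pvLine] at hA
  dsimp only [build_hex_lines]
  rw [hA]

-- ===== VERDICT =====
theorem build_hex_lines_spec : Claim_equal_build_hex_lines := by
  intro data _
  unfold Spec_build_hex_lines
  rw [pvA_eq_join, pvAlt_eq_join]
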